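-- pv_equiv track=rewrite | github.com/canit0221/code-kata | 프로그래머스/0/120956. 옹알이 （1）/옹알이 （1）.py | solution
-- ===== SOURCE A (Python) =====
-- def solution(babbling):
--     answer = 0
--     pron = ["aya", "ye", "woo", "ma"]
--
--     for b in babbling:
--         # 발음이 남아있을 동안 반복
--         while True:
--             original_b = b  # 원래 문자열 저장
--             for p in pron:
--                 if b.find(p) == 0:
--                     b = b.replace(p, '', 1)  # 첫 번째 발생만 제거
--             if original_b == b:  # 더 이상 변경이 없으면 종료
--                 break
--         if len(b) == 0:
--             answer += 1
--
--     return answer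
-- ===== SOURCE B (Python) =====
-- def solution(babbling):
--     tokens = ("aya", "ye", "woo", "ma")
--     cnt = 0
--     for b in babbling:
--         # dynamic programming over positions, built back to front:
--         # after handling position i, dp == [dp[i], dp[i+1], ..., dp[n]] where
--         # dp[j] is True iff the suffix b[j:] is a concatenation of tokens
--         dp = [True]  # the empty suffix (position n) is decomposable
--         for i in range(len(b) - 1, -1, -1):
--             dp = [any(b.startswith(t, i) and dp[len(t) - 1] for t in tokens)] + dp
--         cnt += dp[0]
--     return cnt
-- ===== Notes on version B (the rewrite author's own statement) =====
-- stated objective: alternative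
-- what changed: A repeatedly strips matching tokens from each string with find/replace fixpoint passes and counts strings that empty out; B builds, per string, a back-to-front dynamic-programming table dp[i] = 'suffix b[i:] is a concatenation of tokens' and counts strings whose dp[0] is True.
import Mathlib
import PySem

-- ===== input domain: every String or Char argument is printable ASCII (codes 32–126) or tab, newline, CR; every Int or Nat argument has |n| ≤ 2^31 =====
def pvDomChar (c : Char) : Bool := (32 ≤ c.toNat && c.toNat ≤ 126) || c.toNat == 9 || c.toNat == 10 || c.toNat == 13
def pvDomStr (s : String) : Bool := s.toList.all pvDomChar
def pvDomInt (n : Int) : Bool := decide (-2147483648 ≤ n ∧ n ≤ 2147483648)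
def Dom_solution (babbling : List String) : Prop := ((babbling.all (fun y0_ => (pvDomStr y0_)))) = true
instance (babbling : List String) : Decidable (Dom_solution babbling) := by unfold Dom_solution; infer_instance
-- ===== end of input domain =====

-- B replaces A's while-loop fixpoint stripping (find/replace + change detection) by a per-string
-- dynamic-programming table dp[i] = "suffix from i decomposes into tokens", built back to front;
-- objective: alternative (a genuinely different algorithm of similar cost).


-- ===== PORT A =====

-- pron = ["aya", "ye", "woo", "ma"] (as code-point lists; PySem strings are List Char)
def pronA : List (List Char) := [['a','y','a'], ['y','e'], ['w','o','o'], ['m','a']]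

-- exact port of b.replace(p, '', 1) for nonempty p: remove the FIRST occurrence of p
def replace1 (s p : List Char) : List Char :=
  if p <+: s then s.drop p.length
  else match s with
    | [] => []
    | c :: cs => c :: replace1 cs p

-- one body of Python's 'for p in pron: if b.find(p) == 0: b = b.replace(p, '', 1)'
def stepA (b p : List Char) : List Char :=
  if PySem.Chars.find b p = 0 then replace1 b p else b

-- one iteration of the while body (the inner for loop)
def passA (b : List Char) : List Char := pronA.foldl stepA b

-- (needed above the claim block: loopA's termination cites it)
theorem find_zero_iff (s p : List Char) : PySem.Chars.find s p = 0 ↔ p <+: s := by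
  constructor
  · intro h
    have h0 : (0:Int) ≤ PySem.Chars.find s p := by omega
    have hp := (PySem.Chars.find_spec h0).1
    rw [h] at hp; simpa using hp
  · intro h
    have h0 : (0:Int) ≤ PySem.Chars.find s p :=
      (PySem.Chars.find_nonneg_iff s p).mpr h.isInfix
    by_contra hne
    have hpos : 0 < (PySem.Chars.find s p).toNat := by omega
    exact (PySem.Chars.find_spec h0).2 0 hpos (by simpa using h)

theorem replace1_prefix (s p : List Char) (h : p <+: s) :
    replace1 s p = s.drop p.length := by
  rw [replace1.eq_def, if_pos h]

theorem stepA_shrink (b p : List Char) (hp : p ≠ []) :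
    stepA b p = b ∨ (stepA b p).length < b.length := by
  unfold stepA
  split_ifs with h
  · right
    have hpre := (find_zero_iff b p).mp h
    rw [replace1_prefix b p hpre]
    have hle := hpre.length_le
    have hpos : 0 < p.length := List.length_pos_iff.mpr hp
    simp; omega
  · left; rfl

theorem foldl_stepA_shrink (ps : List (List Char)) (hps : ∀ p ∈ ps, p ≠ []) (b : List Char) :
    ps.foldl stepA b = b ∨ (ps.foldl stepA b).length < b.length := by
  induction ps generalizing b with
  | nil => left; rfl
  | cons p ps ih =>
    simp only [List.foldl]
    rcases stepA_shrink b p (hps p (by simp)) with h | h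
    · rw [h]; exact ih (fun q hq => hps q (by simp [hq])) b
    · rcases ih (fun q hq => hps q (by simp [hq])) (stepA b p) with h2 | h2
      · right; rw [h2]; exact h
      · right; omega

theorem passA_shrink (b : List Char) :
    passA b = b ∨ (passA b).length < b.length :=
  foldl_stepA_shrink pronA (by decide) b

-- the while True loop: strip until a full pass changes nothing
def loopA (b : List Char) : List Char :=
  let b2 := passA b
  if _h : b2 = b then b
  else loopA b2
termination_by b.length
decreasing_by
  rcases passA_shrink b with h' | h'
  · exact absurd h' _h
  · exact h'

def solution (babbling : List String) : Int :=
  babbling.foldl (fun answer b =>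
    if (loopA b.toList).length = 0 then answer + 1 else answer) 0

-- ===== PORT B =====

-- tokens = ("aya", "ye", "woo", "ma")
def tokensB : List (List Char) := [['a','y','a'], ['y','e'], ['w','o','o'], ['m','a']]

-- one DP step at position i: prepend dp[i] computed from the table of positions i+1..n.
-- Source B indexes dp[len(t)-1] only when b.startswith(t, i) holds (short-circuit `and`), which
-- guarantees the index is in range, so getD is exact there.
def dpStep (s : List Char) (dp : List Bool) (i : Nat) : List Bool :=
  (tokensB.any (fun t => t.isPrefixOf (s.drop i) && dp.getD (t.length - 1) false)) :: dp

-- the table after the i-loop; (List.range n).reverse is range(n-1, -1, -1)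
def buildDp (s : List Char) : List Bool :=
  ((List.range s.length).reverse).foldl (dpStep s) [true]

def solution_alt (babbling : List String) : Int :=
  babbling.foldl (fun cnt b =>
    if (buildDp b.toList).getD 0 false then cnt + 1 else cnt) 0

-- ===== PRECONDITION & SPEC =====
def Spec_solution (babbling : List String) (out : Int) : Prop := out = solution_alt babbling
instance (babbling : List String) (out : Int) : Decidable (Spec_solution babbling out) := by unfold Spec_solution; infer_instance

-- ===== CLAIM (what is proved, stated in full; the proofs are below) =====
def Claim_equal_solution : Prop := ∀ (babbling : List String), Dom_solution babbling → Spec_solution babbling (solution babbling)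

-- ===== LEMMAS AND PROOFS =====

-- proof-side characterisation: s decomposes into tokens (greedy is complete here since the
-- four tokens start with four distinct letters, so at most one can be a prefix)
def dec (s : List Char) : Bool :=
  if h : s = [] then true
  else if h1 : ['a','y','a'] <+: s then dec (s.drop 3)
  else if h2 : ['y','e'] <+: s then dec (s.drop 2)
  else if h3 : ['w','o','o'] <+: s then dec (s.drop 3)
  else if h4 : ['m','a'] <+: s then dec (s.drop 2)
  else false
termination_by s.length
decreasing_by
  all_goals
    have : 0 < s.length := List.length_pos_iff.mpr h
    simp; omega

theorem dec_nil : dec [] = true := by rw [dec]; simp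

theorem dec_aya (r : List Char) : dec ('a'::'y'::'a'::r) = dec r := by
  rw [dec]; simp

theorem dec_ye (r : List Char) : dec ('y'::'e'::r) = dec r := by
  rw [dec]; simp [List.cons_prefix_cons]

theorem dec_woo (r : List Char) : dec ('w'::'o'::'o'::r) = dec r := by
  rw [dec]; simp [List.cons_prefix_cons]

theorem dec_ma (r : List Char) : dec ('m'::'a'::r) = dec r := by
  rw [dec]; simp [List.cons_prefix_cons]

-- ----- A-side: loopA empties s iff dec s -----

theorem stepA_dec (b p : List Char) (hp : p ∈ pronA) : dec (stepA b p) = dec b := by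
  unfold stepA
  split_ifs with h
  · obtain ⟨t, rfl⟩ := (find_zero_iff b p).mp h
    rw [replace1_prefix _ _ (List.prefix_append p t)]
    fin_cases hp <;> simp [dec_aya, dec_ye, dec_woo, dec_ma]
  · rfl

theorem passA_dec (b : List Char) : dec (passA b) = dec b := by
  unfold passA pronA
  simp only [List.foldl]
  rw [stepA_dec _ _ (by decide), stepA_dec _ _ (by decide),
      stepA_dec _ _ (by decide), stepA_dec _ _ (by decide)]

theorem loopA_dec (b : List Char) : dec (loopA b) = dec b := by
  fun_induction loopA b with
  | case1 x b2 h => rfl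
  | case2 x b2 h ih => exact ih.trans (passA_dec x)

theorem loopA_fix (b : List Char) : passA (loopA b) = loopA b := by
  fun_induction loopA b with
  | case1 x b2 h => exact h
  | case2 x b2 h ih => exact ih

theorem stepA_length_le (b p : List Char) (hp : p ≠ []) : (stepA b p).length ≤ b.length := by
  rcases stepA_shrink b p hp with h | h
  · rw [h]
  · omega

theorem not_prefix_of_step_eq (s p : List Char) (hp : p ≠ []) (hstep : stepA s p = s) :
    ¬ p <+: s := by
  intro hpre
  have hf := (find_zero_iff s p).mpr hpre
  rw [stepA, if_pos hf, replace1_prefix s p hpre] at hstep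
  have hlen := congrArg List.length hstep
  have hle := hpre.length_le
  have hpos : 0 < p.length := List.length_pos_iff.mpr hp
  simp at hlen; omega

theorem pass_fix_steps (s : List Char) (hfix : passA s = s) :
    ∀ p ∈ pronA, stepA s p = s := by
  unfold passA pronA at hfix
  simp only [List.foldl] at hfix
  have q1 : stepA s ['a','y','a'] = s := by
    rcases stepA_shrink s ['a','y','a'] (by simp) with h | h
    · exact h
    · exfalso
      have L2 := stepA_length_le (stepA s ['a','y','a']) ['y','e'] (by simp)
      have L3 := stepA_length_le (stepA (stepA s ['a','y','a']) ['y','e']) ['w','o','o'] (by simp)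
      have L4 := stepA_length_le (stepA (stepA (stepA s ['a','y','a']) ['y','e']) ['w','o','o']) ['m','a'] (by simp)
      have hlen := congrArg List.length hfix
      omega
  rw [q1] at hfix
  have q2 : stepA s ['y','e'] = s := by
    rcases stepA_shrink s ['y','e'] (by simp) with h | h
    · exact h
    · exfalso
      have L3 := stepA_length_le (stepA s ['y','e']) ['w','o','o'] (by simp)
      have L4 := stepA_length_le (stepA (stepA s ['y','e']) ['w','o','o']) ['m','a'] (by simp)
      have hlen := congrArg List.length hfix
      omega
  rw [q2] at hfix
  have q3 : stepA s ['w','o','o'] = s := by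
    rcases stepA_shrink s ['w','o','o'] (by simp) with h | h
    · exact h
    · exfalso
      have L4 := stepA_length_le (stepA s ['w','o','o']) ['m','a'] (by simp)
      have hlen := congrArg List.length hfix
      omega
  rw [q3] at hfix
  intro p hp
  fin_cases hp <;> assumption

theorem fix_nonempty (s : List Char) (hfix : passA s = s) (hne : s ≠ []) : dec s = false := by
  have hsteps := pass_fix_steps s hfix
  have n1 := not_prefix_of_step_eq s ['a','y','a'] (by simp) (hsteps _ (by decide))
  have n2 := not_prefix_of_step_eq s ['y','e'] (by simp) (hsteps _ (by decide))
  have n3 := not_prefix_of_step_eq s ['w','o','o'] (by simp) (hsteps _ (by decide))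
  have n4 := not_prefix_of_step_eq s ['m','a'] (by simp) (hsteps _ (by decide))
  rw [dec]
  simp [hne, n1, n2, n3, n4]

theorem loop_empty_iff (b : List Char) : loopA b = [] ↔ dec b = true := by
  constructor
  · intro h
    have hok := loopA_dec b
    rw [h, dec_nil] at hok
    exact hok.symm
  · intro h
    by_contra hne
    have hbad := fix_nonempty _ (loopA_fix b) hne
    rw [loopA_dec b, h] at hbad
    cases hbad

-- ----- B-side: the DP table computes dec at every position -----

-- because the tokens start with four distinct letters, the if-chain of dec equals the any-disjunction
theorem dec_eq_any (s : List Char) (hne : s ≠ []) :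
    dec s = tokensB.any (fun t => t.isPrefixOf s && dec (s.drop t.length)) := by
  rw [dec]
  simp only [tokensB, List.any_cons, List.any_nil, Bool.or_false]
  by_cases h1 : ['a','y','a'] <+: s
  · obtain ⟨r, rfl⟩ := h1
    simp [List.isPrefixOf, List.cons_prefix_cons]
  · by_cases h2 : ['y','e'] <+: s
    · obtain ⟨r, rfl⟩ := h2
      simp [List.isPrefixOf, List.cons_prefix_cons]
    · by_cases h3 : ['w','o','o'] <+: s
      · obtain ⟨r, rfl⟩ := h3
        simp [List.isPrefixOf, List.cons_prefix_cons]
      · by_cases h4 : ['m','a'] <+: s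
        · obtain ⟨r, rfl⟩ := h4
          simp [List.isPrefixOf, List.cons_prefix_cons]
        · simp only [hne, h1, h2, h3, h4, dif_neg, not_false_iff]
          rw [← List.isPrefixOf_iff_prefix] at h1 h2 h3 h4
          simp [h1, h2, h3, h4]

-- the table of dec-values for positions m..n
def dpSuffix (s : List Char) (m : Nat) : List Bool :=
  (List.range (s.length - m + 1)).map (fun k => dec (s.drop (m + k)))

theorem dpSuffix_cons (s : List Char) (m : Nat) (hm : m < s.length) :
    dpSuffix s m = dec (s.drop m) :: dpSuffix s (m + 1) := by
  unfold dpSuffix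
  have h1 : s.length - m + 1 = (s.length - (m+1) + 1) + 1 := by omega
  rw [h1, List.range_succ_eq_map, List.map_cons, List.map_map]
  refine congrArg₂ List.cons (by simp) ?_
  apply List.map_congr_left
  intro a _
  simp only [Function.comp_apply]
  have h2 : m + (a + 1) = m + 1 + a := by omega
  rw [h2]

theorem dpSuffix_getD (s : List Char) (m k : Nat) (hk : k ≤ s.length - m) :
    (dpSuffix s m).getD k false = dec (s.drop (m + k)) := by
  unfold dpSuffix
  rw [List.getD_eq_getElem?_getD, List.getElem?_map]
  rw [List.getElem?_range (by omega)]
  simp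

theorem dpStep_suffix (s : List Char) (m : Nat) (hm : m < s.length) :
    dpStep s (dpSuffix s (m + 1)) m = dpSuffix s m := by
  have key : ∀ t ∈ tokensB,
      (t.isPrefixOf (s.drop m) && (dpSuffix s (m+1)).getD (t.length - 1) false)
        = (t.isPrefixOf (s.drop m) && dec ((s.drop m).drop t.length)) := by
    intro t ht
    by_cases hp : t.isPrefixOf (s.drop m)
    · have hpre : t <+: s.drop m := List.isPrefixOf_iff_prefix.mp hp
      have hlen : t.length ≤ s.length - m := by
        have := hpre.length_le
        simpa using this
      have htpos : 0 < t.length := by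
        fin_cases ht <;> simp
      rw [dpSuffix_getD s (m+1) (t.length - 1) (by omega), List.drop_drop]
      congr 3
      omega
    · simp [hp]
  rw [dpSuffix_cons s m hm]
  unfold dpStep
  rw [dec_eq_any (s.drop m) (by simp; omega)]
  simp only [tokensB, List.any_cons, List.any_nil]
  rw [key _ (by decide), key _ (by decide), key _ (by decide), key _ (by decide)]

theorem foldl_dp_inv (s : List Char) (m : Nat) (hm : m ≤ s.length) :
    ((List.range m).reverse).foldl (dpStep s) (dpSuffix s m) = dpSuffix s 0 := by
  induction m with
  | zero => simp
  | succ m ih =>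
    rw [List.range_succ, List.reverse_append]
    simp only [List.reverse_cons, List.reverse_nil, List.nil_append, List.cons_append,
      List.foldl_cons, List.nil_append]
    rw [dpStep_suffix s m (by omega)]
    exact ih (by omega)

theorem buildDp_head (s : List Char) : (buildDp s).getD 0 false = dec s := by
  unfold buildDp
  have hinit : ([true] : List Bool) = dpSuffix s s.length := by
    unfold dpSuffix
    simp [dec_nil]
  rw [hinit, foldl_dp_inv s s.length (le_refl _)]
  rw [dpSuffix_getD s 0 0 (by omega)]
  simp

-- ----- combining the folds -----

theorem count_fold (l : List String) (c : Int) :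
    l.foldl (fun answer b => if (loopA b.toList).length = 0 then answer + 1 else answer) c
      = l.foldl (fun cnt b => if (buildDp b.toList).getD 0 false then cnt + 1 else cnt) c := by
  induction l generalizing c with
  | nil => rfl
  | cons x xs ih =>
    simp only [List.foldl]
    have hiff : ((loopA x.toList).length = 0) ↔ ((buildDp x.toList).getD 0 false = true) := by
      rw [List.length_eq_zero_iff, buildDp_head]
      exact loop_empty_iff _
    split_ifs with h1 h2 h2
    · exact ih _
    · exact absurd (hiff.mp h1) h2
    · exact absurd (hiff.mpr h2) h1
    · exact ih _

-- ===== VERDICT (by name: the statement is the Claim_ definition above) =====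
theorem solution_spec : Claim_equal_solution := by
  intro babbling _
  unfold Spec_solution solution solution_alt
  exact count_fold babbling 0
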